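-- pv_equiv track=rewrite | github.com/Inori/GPCS4 | Tools/Pm4Plugin.py | get_max_code
-- ===== SOURCE A (Python) =====
-- def get_max_code(table):
--     max_code = 0
--     max_sub_code = 0
--     code_dic = {}
--     for (gnm_name, packet_count, pm4type, opcode, handler, code_lines) in table:
--         if opcode > max_code:
--             max_code = opcode
--
--         if opcode not in code_dic:
--             code_dic[opcode] = 1
--         else:
--             code_dic[opcode] += 1
--
--         count = code_dic[opcode]
--         if count > max_sub_code:
--             max_sub_code = count
--
--     return max_code, max_sub_code
-- ===== SOURCE B (Python) =====
-- def get_max_code(table):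
--     opcodes = sorted(opcode for (gnm_name, packet_count, pm4type, opcode, handler, code_lines) in table)
--     if not opcodes:
--         return 0, 0
--     max_code = max(opcodes[-1], 0)
--     best = 0
--     run = 0
--     prev = None
--     for op in opcodes:
--         run = run + 1 if prev == op else 1
--         if run > best:
--             best = run
--         prev = op
--     return max_code, best
-- ===== Notes on version B (the rewrite author's own statement) =====
-- stated objective: alternative
-- what changed: Replaces A's hash-table tally with a sort-then-scan algorithm: sort the opcode column, read the maximum off the last element (floored at 0), and find the maximum duplicate count as the longest run of equal adjacent elements in the sorted list, with no dictionary at all.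
import Mathlib
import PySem

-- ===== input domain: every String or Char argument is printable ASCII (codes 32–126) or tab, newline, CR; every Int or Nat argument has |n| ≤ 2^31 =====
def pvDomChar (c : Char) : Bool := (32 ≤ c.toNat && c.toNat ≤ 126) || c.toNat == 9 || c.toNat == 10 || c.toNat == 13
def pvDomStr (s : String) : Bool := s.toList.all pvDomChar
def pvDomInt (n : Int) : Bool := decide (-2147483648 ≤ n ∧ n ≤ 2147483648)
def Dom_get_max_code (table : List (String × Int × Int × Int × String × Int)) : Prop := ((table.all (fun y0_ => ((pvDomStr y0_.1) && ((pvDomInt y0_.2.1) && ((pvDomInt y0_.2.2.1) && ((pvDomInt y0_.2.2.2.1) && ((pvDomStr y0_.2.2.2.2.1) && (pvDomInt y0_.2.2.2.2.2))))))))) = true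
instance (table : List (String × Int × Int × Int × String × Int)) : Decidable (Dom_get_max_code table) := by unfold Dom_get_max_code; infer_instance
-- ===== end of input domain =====

-- B replaces A's dict tally with sort-then-scan (max = last of the sorted opcodes floored
-- at 0, max duplicate count = longest run of equal adjacent sorted elements); proved equal.

-- ===== PORT A =====
-- single interleaved pass: running max opcode, dict of counts, running max count
def get_max_code (table : List (String × Int × Int × Int × String × Int)) : Int × Int :=
  let r := table.foldl
    (fun (st : Int × Int × PySem.Dict Int Int) row =>
      let mc := st.1
      let msc := st.2.1
      let d := st.2.2
      let opcode := row.2.2.2.1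
      let mc := if opcode > mc then opcode else mc
      -- 'if opcode not in code_dic: code_dic[opcode] = 1 else: code_dic[opcode] += 1'
      let d := if d.contains opcode = false then d.insert opcode 1
               else d.insert opcode (d.getD opcode 0 + 1)
      let count := d.getD opcode 0
      let msc := if count > msc then count else msc
      (mc, msc, d))
    ((0 : Int), (0 : Int), PySem.Dict.empty)
  (r.1, r.2.1)

-- ===== PORT B =====
-- loop body of Source B: state = (best, run, prev); 'prev == op' with prev = None is False in Python
def pvStepB (s : Int × Int × Option Int) (op : Int) : Int × Int × Option Int :=
  let run := if s.2.2 = some op then s.2.1 + 1 else 1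
  let best := if run > s.1 then run else s.1
  (best, run, some op)

def get_max_code_alt (table : List (String × Int × Int × Int × String × Int)) : Int × Int :=
  let opcodes := PySem.List.sorted (table.map (fun r => r.2.2.2.1)) (fun x => x) false
  if opcodes.isEmpty then (0, 0)
  else
    -- opcodes[-1]; '.getD 0' only totalizes: opcodes is nonempty here, so pyGet? is some
    let max_code := max ((PySem.List.pyGet? opcodes (-1)).getD 0) 0
    let st := opcodes.foldl pvStepB ((0 : Int), (0 : Int), (none : Option Int))
    (max_code, st.1)

-- ===== PRECONDITION & SPEC =====
def Spec_get_max_code (table : List (String × Int × Int × Int × String × Int)) (out : Int × Int) : Prop := out = get_max_code_alt table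
instance (table : List (String × Int × Int × Int × String × Int)) (out : Int × Int) : Decidable (Spec_get_max_code table out) := by unfold Spec_get_max_code; infer_instance

-- ===== CLAIM (what is proved, stated in full; the proofs are below) =====
def Claim_equal_get_max_code : Prop := ∀ (table : List (String × Int × Int × Int × String × Int)), Dom_get_max_code table → Spec_get_max_code table (get_max_code table)

-- ===== LEMMAS AND PROOFS =====

-- the opcode column
def pvOps (l : List (String × Int × Int × Int × String × Int)) : List Int :=
  l.map (fun r => r.2.2.2.1)

-- max (with floor 0) of the multiplicities of a list of opcodes
def pvF (os : List Int) : Int :=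
  ((PySem.Set.ofList os).map (fun k => (os.count k : Int))).foldl max 0

lemma pv_foldl_max_le (xs : List Int) : ∀ init B : Int, init ≤ B → (∀ x ∈ xs, x ≤ B) →
    xs.foldl max init ≤ B := by
  induction xs with
  | nil => intro init B h _; simpa using h
  | cons y ys ih =>
    intro init B h hall
    simp only [List.foldl_cons]
    exact ih _ _ (max_le h (hall y (by simp))) (fun x hx => hall x (by simp [hx]))

lemma pvF_append (os : List Int) (x : Int) :
    pvF (os ++ [x]) = max (pvF os) ((os.count x : Int) + 1) := by
  have hcnt : ∀ k : Int, ((os ++ [x]).count k : Int)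
      = if k = x then (os.count k : Int) + 1 else (os.count k : Int) := by
    intro k
    by_cases h : k = x
    · simp [List.count_append, h]
    · simp [List.count_append, List.count_singleton, h]
      omega
  by_cases hx : x ∈ os
  · have hset : PySem.Set.ofList (os ++ [x]) = PySem.Set.ofList os := by
      rw [PySem.Set.ofList_append_singleton, PySem.Set.add_of_mem ((PySem.Set.mem_ofList os x).2 hx)]
    have hxk : x ∈ PySem.Set.ofList os := (PySem.Set.mem_ofList os x).2 hx
    have hF := PySem.List.le_foldl_max ((PySem.Set.ofList os).map (fun k => ((os).count k : Int))) 0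
    have hF' := PySem.List.le_foldl_max ((PySem.Set.ofList os).map (fun k => ((os ++ [x]).count k : Int))) 0
    unfold pvF
    rw [hset]
    apply le_antisymm
    · apply pv_foldl_max_le
      · exact le_max_of_le_left hF.1
      · intro v hv
        rcases List.mem_map.1 hv with ⟨k, hk, rfl⟩
        rw [hcnt k]
        by_cases h : k = x
        · subst h; simp
        · rw [if_neg h]
          exact le_max_of_le_left (hF.2 _ (List.mem_map_of_mem hk))
    · apply max_le
      · apply pv_foldl_max_le
        · exact hF'.1
        · intro v hv
          rcases List.mem_map.1 hv with ⟨k, hk, rfl⟩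
          have hb := hF'.2 _ (List.mem_map_of_mem hk)
          rw [hcnt k] at hb
          by_cases h : k = x
          · rw [if_pos h] at hb; omega
          · rw [if_neg h] at hb; exact hb
      · have hb := hF'.2 _ (List.mem_map_of_mem hxk)
        rw [hcnt x, if_pos rfl] at hb
        exact hb
  · have hset : PySem.Set.ofList (os ++ [x]) = PySem.Set.ofList os ++ [x] := by
      rw [PySem.Set.ofList_append_singleton,
        PySem.Set.add_of_not_mem (fun h => hx ((PySem.Set.mem_ofList os x).1 h))]
    have hx0 : os.count x = 0 := List.count_eq_zero.2 hx
    have hmapeq : (PySem.Set.ofList os).map (fun k => ((os ++ [x]).count k : Int))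
        = (PySem.Set.ofList os).map (fun k => ((os).count k : Int)) := by
      apply List.map_congr_left
      intro k hk
      have : k ≠ x := fun h => hx (h ▸ (PySem.Set.mem_ofList os k).1 hk)
      rw [hcnt k, if_neg this]
    unfold pvF
    rw [hset, List.map_append, List.foldl_append, hmapeq]
    simp [hx0]

-- characterization of A's interleaved loop
lemma pv_loopA (l : List (String × Int × Int × Int × String × Int)) :
    l.foldl
      (fun (st : Int × Int × PySem.Dict Int Int) row =>
        let mc := st.1
        let msc := st.2.1
        let d := st.2.2
        let opcode := row.2.2.2.1
        let mc := if opcode > mc then opcode else mc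
        let d := if d.contains opcode = false then d.insert opcode 1
                 else d.insert opcode (d.getD opcode 0 + 1)
        let count := d.getD opcode 0
        let msc := if count > msc then count else msc
        (mc, msc, d))
      ((0 : Int), (0 : Int), PySem.Dict.empty) =
    ((pvOps l).foldl (fun a o => if o > a then o else a) 0,
     pvF (pvOps l),
     (pvOps l).foldl (fun (d : PySem.Dict Int Int) op => d.insert op (d.getD op 0 + 1)) PySem.Dict.empty) := by
  induction l using List.reverseRecOn with
  | nil => rfl
  | append_singleton xs x ih =>
    have hops : pvOps (xs ++ [x]) = pvOps xs ++ [x.2.2.2.1] := by simp [pvOps]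
    rw [List.foldl_append, ih, hops, List.foldl_append]
    simp only [List.foldl_cons, List.foldl_nil]
    set o := x.2.2.2.1 with ho
    set C := (pvOps xs).foldl (fun (d : PySem.Dict Int Int) op => d.insert op (d.getD op 0 + 1)) PySem.Dict.empty with hC
    have hgetD : ∀ v : Int, C.getD v 0 = ((pvOps xs).count v : Int) := by
      intro v
      rw [hC, PySem.Dict.getD_foldl_insert_add_one]
      simp [PySem.Dict.getD_empty]
    have hdict : (if C.contains o = false then C.insert o 1
                  else C.insert o (C.getD o 0 + 1)) = C.insert o (C.getD o 0 + 1) := by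
      by_cases h : C.contains o = false
      · rw [if_pos h, PySem.Dict.getD_of_not_contains C 0 h]
        norm_num
      · rw [if_neg h]
    rw [hdict]
    refine Prod.ext rfl (Prod.ext ?_ ?_)
    swap
    · show C.insert o (C.getD o 0 + 1)
          = (pvOps xs ++ [o]).foldl (fun (d : PySem.Dict Int Int) op => d.insert op (d.getD op 0 + 1)) PySem.Dict.empty
      rw [List.foldl_append]
      rfl
    show (if (C.insert o (C.getD o 0 + 1)).getD o 0 > pvF (pvOps xs)
          then (C.insert o (C.getD o 0 + 1)).getD o 0 else pvF (pvOps xs))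
        = pvF (pvOps xs ++ [o])
    rw [PySem.Dict.getD_insert_self, hgetD o, pvF_append]
    rw [max_def]
    split_ifs <;> omega

lemma pv_ite_max : (fun (a o : Int) => if o > a then o else a) = (fun a o => max a o) := by
  funext a o
  rw [max_def]
  split_ifs <;> omega

-- pvF only depends on the multiset of opcodes
lemma pvF_perm {xs ys : List Int} (h : xs.Perm ys) : pvF xs = pvF ys := by
  have hsp : (PySem.Set.ofList xs).Perm (PySem.Set.ofList ys) := by
    apply (List.perm_ext_iff_of_nodup (PySem.Set.nodup_ofList xs) (PySem.Set.nodup_ofList ys)).2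
    intro k
    rw [PySem.Set.mem_ofList, PySem.Set.mem_ofList]
    exact h.mem_iff
  have hmap : ((PySem.Set.ofList xs).map (fun k => (xs.count k : Int))).Perm
      ((PySem.Set.ofList ys).map (fun k => (ys.count k : Int))) := by
    have h1 : ((PySem.Set.ofList ys).map (fun k => (xs.count k : Int)))
        = ((PySem.Set.ofList ys).map (fun k => (ys.count k : Int))) := by
      apply List.map_congr_left
      intro k _
      rw [h.count_eq]
    exact h1 ▸ hsp.map (fun k => (xs.count k : Int))
  unfold pvF
  exact hmap.foldl_eq' (fun x _ y _ z => max_right_comm z x y) 0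

-- in a ≤-sorted list every element is at most the last one
lemma pv_mem_le_getLast : ∀ (p : List Int), p.Pairwise (· ≤ ·) → ∀ (h : p ≠ []),
    ∀ y ∈ p, y ≤ p.getLast h := by
  intro p
  induction p with
  | nil => intro _ h; exact absurd rfl h
  | cons a t ih =>
    intro hp _ y hy
    rcases List.pairwise_cons.1 hp with ⟨ha, ht⟩
    rcases List.mem_cons.1 hy with rfl | hyt
    · cases t with
      | nil => simp [List.getLast]
      | cons b u =>
        rw [List.getLast_cons (by simp)]
        exact le_trans (ha b (by simp)) (ih ht (by simp) b (by simp))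

    · cases t with
      | nil => cases hyt
      | cons b u =>
        rw [List.getLast_cons (by simp)]
        exact ih ht (by simp) y hyt

-- the run scan over a sorted list: best = pvF, run = count of the last element, prev = last
lemma pv_scanB : ∀ (p : List Int), p.Pairwise (· ≤ ·) →
    p.foldl pvStepB ((0 : Int), (0 : Int), (none : Option Int))
      = (pvF p,
         (match p.getLast? with | none => 0 | some v => (p.count v : Int)),
         p.getLast?) := by
  intro p
  induction p using List.reverseRecOn with
  | nil => intro _; rfl
  | append_singleton q x ih =>
    intro hp
    have hq : q.Pairwise (· ≤ ·) := hp.sublist (List.sublist_append_left q [x])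
    have hle : ∀ y ∈ q, y ≤ x := by
      intro y hy
      rcases List.pairwise_append.1 hp with ⟨_, _, hrel⟩
      exact hrel y hy x (by simp)
    rw [List.foldl_append, ih hq, List.foldl_cons, List.foldl_nil]
    have hlast : (q ++ [x]).getLast? = some x := by simp
    cases hq' : q with
    | nil =>
      subst hq'
      simp [pvStepB, pvF, PySem.Set.ofList]
    | cons a t =>
      have hqne : q ≠ [] := by rw [hq']; simp
      rw [← hq'] at *
      have hgl : q.getLast? = some (q.getLast hqne) := List.getLast?_eq_some_getLast hqne
      rw [hgl]
      unfold pvStepB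
      simp only [hlast]
      set L := q.getLast hqne with hL
      by_cases hLx : some L = some x
      · have hLx' : L = x := Option.some.inj hLx
        rw [if_pos hLx]
        have hcnt : ((q ++ [x]).count x : Int) = (q.count x : Int) + 1 := by
          simp [List.count_append]
        refine Prod.ext ?_ (Prod.ext ?_ rfl)
        · show (if (q.count L : Int) + 1 > pvF q then (q.count L : Int) + 1 else pvF q) = pvF (q ++ [x])
          rw [pvF_append, hLx', max_def]
          split_ifs <;> omega
        · show (q.count L : Int) + 1 = ((q ++ [x]).count x : Int)
          rw [hLx', hcnt]
      · have hne : L ≠ x := fun h => hLx (by rw [h])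
        have hxq : x ∉ q := by
          intro hxin
          exact hne (le_antisymm (hle L (List.getLast_mem hqne)) (pv_mem_le_getLast q hq hqne x hxin))
        have hc0 : q.count x = 0 := List.count_eq_zero.2 hxq
        rw [if_neg hLx]
        have hF1 : (1 : Int) ≤ pvF (q ++ [x]) := by
          rw [pvF_append, hc0]
          simp
        refine Prod.ext ?_ (Prod.ext ?_ rfl)
        · show (if (1 : Int) > pvF q then 1 else pvF q) = pvF (q ++ [x])
          rw [pvF_append, hc0, max_def]
          push_cast
          split_ifs <;> omega
        · show (1 : Int) = ((q ++ [x]).count x : Int)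
          simp [List.count_append, hc0]

-- ===== VERDICT (by name: the statement is the Claim_ definition above) =====
theorem get_max_code_spec : Claim_equal_get_max_code := by
  intro table _
  show get_max_code table = get_max_code_alt table
  unfold get_max_code get_max_code_alt
  rw [pv_loopA]
  simp only []
  set os := table.map (fun r => r.2.2.2.1) with hos
  have hpvops : pvOps table = os := rfl
  set sos := PySem.List.sorted os (fun x => x) false with hsos
  have hperm : sos.Perm os := PySem.List.sorted_perm os (fun x => x) false
  have hsorted : sos.Pairwise (· ≤ ·) := by
    have := PySem.List.sorted_pairwise os (fun x => x)
    simpa [hsos] using this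
  by_cases hnil : sos = []
  · have hosnil : os = [] := by
      have := hperm.length_eq
      rw [hnil] at this
      exact List.eq_nil_of_length_eq_zero this.symm
    rw [hnil]
    simp [hpvops, hosnil, pvF, PySem.Set.ofList]
  · rw [if_neg (by simp [List.isEmpty_iff, hnil])]
    have hglast : sos.getLast? = some (sos.getLast hnil) := List.getLast?_eq_some_getLast hnil
    refine Prod.ext ?_ ?_
    · -- max component
      show (pvOps table).foldl (fun a o => if o > a then o else a) 0
          = max ((PySem.List.pyGet? sos (-1)).getD 0) 0
      rw [hpvops, pv_ite_max, PySem.List.pyGet?_neg_one, hglast, Option.getD_some]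
      set L := sos.getLast hnil with hL
      have hfold_eq : os.foldl max 0 = sos.foldl max 0 :=
        (hperm.foldl_eq' (fun x _ y _ z => max_right_comm z x y) 0).symm
      rw [hfold_eq]
      have hbd := PySem.List.le_foldl_max sos (0 : Int)
      apply le_antisymm
      · apply pv_foldl_max_le
        · exact le_max_right L 0
        · intro x hx
          exact le_max_of_le_left (pv_mem_le_getLast sos hsorted hnil x hx)
      · exact max_le (hbd.2 L (List.getLast_mem hnil)) hbd.1
    · -- max multiplicity component
      show pvF (pvOps table) = (sos.foldl pvStepB ((0:Int), (0:Int), (none : Option Int))).1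
      rw [pv_scanB sos hsorted, hpvops]
      exact pvF_perm hperm.symm
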